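-- pv_equiv track=rewrite | github.com/kamolas92/kamolaspython | lesson-12/homework/hw.py | divide_range
-- ===== SOURCE A (Python) =====
-- def divide_range(start, end, num_threads):
--     """Umumiy oraliqni num_threads ta bo‘lakka ajratadi"""
--     step = (end - start + 1) // num_threads
--     ranges = []
--     for i in range(num_threads):
--         range_start = start + i * step
--         range_end = start + (i + 1) * step - 1
--         if i == num_threads - 1:
--             range_end = end  # oxirgi bo‘lak to‘liq qamrab oladi
--         ranges.append((range_start, range_end))
--     return ranges
-- ===== SOURCE B (Python) =====
-- def divide_range(start, end, num_threads):
--     """Umumiy oraliqni num_threads ta bo'lakka ajratadi"""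
--     step = (end - start + 1) // num_threads
--
--     def go(s, e, k):
--         # k equal-width (step) chunks covering [s, e]; the last chunk ends at e
--         if k <= 0:
--             return []
--         if k == 1:
--             return [(s, e)]
--         h = k // 2
--         mid = s + h * step
--         return go(s, mid - 1, h) + go(mid, e, k - h)
--
--     return go(start, end, num_threads)
-- ===== Notes on version B (the rewrite author's own statement) =====
-- stated objective: alternative
-- what changed: Replaces A's linear accumulating loop (with a last-iteration special case) by a divide-and-conquer recursion that halves the thread count and recursively subdivides the left and right sub-ranges; the final end is threaded down as the right recursion's upper bound, so no last-chunk branch exists.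
import Mathlib
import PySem

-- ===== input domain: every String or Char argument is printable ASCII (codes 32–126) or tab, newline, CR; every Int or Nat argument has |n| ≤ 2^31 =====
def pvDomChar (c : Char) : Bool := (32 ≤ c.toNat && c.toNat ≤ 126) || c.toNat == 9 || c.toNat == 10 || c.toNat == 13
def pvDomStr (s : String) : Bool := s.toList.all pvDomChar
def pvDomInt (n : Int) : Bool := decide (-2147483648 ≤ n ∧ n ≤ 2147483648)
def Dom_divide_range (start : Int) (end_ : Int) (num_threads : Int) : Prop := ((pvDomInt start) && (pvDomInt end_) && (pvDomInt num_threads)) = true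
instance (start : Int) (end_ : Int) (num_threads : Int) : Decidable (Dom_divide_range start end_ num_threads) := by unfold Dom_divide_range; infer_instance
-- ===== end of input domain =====

-- B replaces A's linear accumulating loop (with its last-iteration special case)
-- by a divide-and-conquer recursion halving the thread count (objective: alternative).

-- ===== PORT A =====
def divide_range (start : Int) (end_ : Int) (num_threads : Int) : List (Int × Int) :=
  let step := PySem.Int.floordiv (end_ - start + 1) num_threads
  (PySem.List.pyRange 0 num_threads 1).foldl (fun ranges i =>
    let range_start := start + i * step
    let range_end := start + (i + 1) * step - 1
    let range_end := if i = num_threads - 1 then end_ else range_end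
    ranges ++ [(range_start, range_end)]) []

-- ===== PORT B =====
-- Source B's inner 'go': k step-width chunks covering [s, e], the last ending at e.
def dr_go (step : Int) (s : Int) (e : Int) (k : Int) : List (Int × Int) :=
  if k ≤ 0 then []
  else if k = 1 then [(s, e)]
  else
    dr_go step s (s + PySem.Int.floordiv k 2 * step - 1) (PySem.Int.floordiv k 2) ++
    dr_go step (s + PySem.Int.floordiv k 2 * step) e (k - PySem.Int.floordiv k 2)
termination_by k.toNat
decreasing_by
  all_goals
    rw [PySem.Int.floordiv_eq_ediv_of_pos (by norm_num : (0:Int) < 2)]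
    omega

def divide_range_alt (start : Int) (end_ : Int) (num_threads : Int) : List (Int × Int) :=
  let step := PySem.Int.floordiv (end_ - start + 1) num_threads
  dr_go step start end_ num_threads

-- ===== PRECONDITION & SPEC =====
-- Python A raises ZeroDivisionError when num_threads == 0 (the '//'); excluded.
def Pre_divide_range (start : Int) (end_ : Int) (num_threads : Int) : Prop := num_threads ≠ 0
instance (start : Int) (end_ : Int) (num_threads : Int) : Decidable (Pre_divide_range start end_ num_threads) := by unfold Pre_divide_range; infer_instance
def pvWitness_divide_range : Int × Int × Int := (0, 9, 2)

def Spec_divide_range (start : Int) (end_ : Int) (num_threads : Int) (out : List (Int × Int)) : Prop := out = divide_range_alt start end_ num_threads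
instance (start : Int) (end_ : Int) (num_threads : Int) (out : List (Int × Int)) : Decidable (Spec_divide_range start end_ num_threads out) := by unfold Spec_divide_range; infer_instance

-- ===== CLAIM (what is proved, stated in full; the proofs are below) =====
def Claim_equal_divide_range : Prop := ∀ (start : Int) (end_ : Int) (num_threads : Int), Dom_divide_range start end_ num_threads → Pre_divide_range start end_ num_threads → Spec_divide_range start end_ num_threads (divide_range start end_ num_threads)

-- ===== LEMMAS AND PROOFS =====

-- Closed characterisation of B's divide-and-conquer: for k ≥ 1 it produces the
-- chunk list indexed 0..k-1, the last chunk ending at e.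
theorem pv_go_eq (step : Int) (n : Nat) :
    ∀ k : Int, k.toNat = n → 1 ≤ k → ∀ s e : Int,
      dr_go step s e k = (List.range k.toNat).map (fun (j : Nat) =>
        (s + (j : Int) * step,
         if (j : Int) = k - 1 then e else s + ((j : Int) + 1) * step - 1)) := by
  induction n using Nat.strong_induction_on with
  | _ n ih =>
    intro k hk hk1 s e
    rw [dr_go]
    rw [if_neg (by omega)]
    by_cases h1 : k = 1
    · subst h1
      simp
    · rw [if_neg h1]
      rw [PySem.Int.floordiv_eq_ediv_of_pos (by norm_num : (0:Int) < 2)]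
      have hk2 : 2 ≤ k := by omega
      have hh1 : 1 ≤ k / 2 := by omega
      have hhk : k / 2 < k := by omega
      have hrk : 1 ≤ k - k / 2 := by omega
      rw [ih (k / 2).toNat (by omega) (k / 2) rfl hh1,
          ih (k - k / 2).toNat (by omega) (k - k / 2) rfl hrk]
      have hsplit : k.toNat = (k / 2).toNat + (k - k / 2).toNat := by omega
      rw [hsplit, List.range_add, List.map_append, List.map_map]
      congr 1
      · refine List.map_congr_left (fun j hj => ?_)
        rw [List.mem_range] at hj
        have hjh : (j : Int) < k / 2 := by omega
        split_ifs with ha hb hb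
        · exact absurd hb (by omega)
        · rw [Prod.mk.injEq]
          exact ⟨rfl, by rw [show k / 2 = (j : Int) + 1 by omega]⟩
        · exact absurd hb (by omega)
        · rfl
      · refine List.map_congr_left (fun j hj => ?_)
        rw [List.mem_range] at hj
        have hcast : (((k / 2).toNat + j : Nat) : Int) = k / 2 + (j : Int) := by
          push_cast; omega
        simp only [Function.comp, hcast]
        split_ifs with ha hb hb
        · rw [Prod.mk.injEq]; exact ⟨by ring, rfl⟩
        · exact absurd (show k / 2 + (j : Int) = k - 1 by omega) hb
        · exact absurd (show (j : Int) = k - k / 2 - 1 by omega) ha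
        · rw [Prod.mk.injEq]; exact ⟨by ring, by ring⟩

-- ===== VERDICT (by name: the statement is the Claim_ definition above) =====
theorem divide_range_spec : Claim_equal_divide_range := by
  intro start end_ num_threads _ hpre
  show _ = _
  unfold divide_range divide_range_alt
  simp only []
  set step := PySem.Int.floordiv (end_ - start + 1) num_threads with hstep
  rw [PySem.List.foldl_append_singleton_eq_map, List.nil_append]
  by_cases hn : 1 ≤ num_threads
  · rw [pv_go_eq step num_threads.toNat num_threads rfl hn start end_]
    rw [PySem.List.pyRange_one, List.map_map]
    simp only [sub_zero]
    refine List.map_congr_left (fun j hj => ?_)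
    simp only [Function.comp, zero_add]
  · rw [dr_go, if_pos (by omega),
        PySem.List.pyRange_one_eq_nil (show num_threads ≤ (0:Int) by omega)]
    simp
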